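-- pv_equiv track=rewrite | github.com/fischerf/aar | agent/transports/companion_state.py | steps_to_level
-- ===== SOURCE A (Python) =====
-- LEVEL_THRESHOLDS: tuple[int, ...] = (0, 5, 15, 30, 50)
--
-- def steps_to_level(steps: int) -> int:
--     """Return companion level (1–5) for *steps* tool calls."""
--     level = 1
--     for threshold in LEVEL_THRESHOLDS[1:]:
--         if steps >= threshold:
--             level += 1
--         else:
--             break
--     return min(level, 5)
-- ===== SOURCE B (Python) =====
-- import bisect
--
-- LEVEL_THRESHOLDS: tuple[int, ...] = (0, 5, 15, 30, 50)
--
-- def steps_to_level(steps: int) -> int: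
--     """Return companion level (1-5) for *steps* tool calls."""
--     idx = bisect.bisect_right(LEVEL_THRESHOLDS, steps)
--     return max(1, min(idx, 5))
-- ===== Notes on version B (the rewrite author's own statement) =====
-- stated objective: idiomatic
-- what changed: Replaced the scan-with-break over the threshold tuple by a bisect_right binary-search lookup followed by max/min clamping.
import Mathlib
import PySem

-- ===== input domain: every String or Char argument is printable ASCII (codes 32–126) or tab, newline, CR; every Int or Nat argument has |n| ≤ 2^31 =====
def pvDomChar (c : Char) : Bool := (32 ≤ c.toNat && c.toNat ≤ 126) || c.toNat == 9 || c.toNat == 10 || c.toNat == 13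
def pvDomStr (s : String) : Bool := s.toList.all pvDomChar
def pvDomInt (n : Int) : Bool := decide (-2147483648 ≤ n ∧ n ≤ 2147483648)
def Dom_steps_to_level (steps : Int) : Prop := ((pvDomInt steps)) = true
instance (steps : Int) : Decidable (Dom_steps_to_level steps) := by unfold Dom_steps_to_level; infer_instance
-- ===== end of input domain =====

-- B replaces A's linear scan-with-break over the thresholds by a bisect_right binary search plus clamping (idiomatic; same result).


-- ===== PORT A =====
-- A scans the tail of the threshold tuple, counting until the first threshold above steps.
def stepsLoop (steps : Int) (level : Int) : List Int → Int
  | [] => level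
  | t :: ts => if steps ≥ t then stepsLoop steps (level + 1) ts else level

def steps_to_level (steps : Int) : Int :=
  min (stepsLoop steps 1 [5, 15, 30, 50]) 5

-- ===== PORT B =====
-- B: bisect.bisect_right ported as the standard binary search (lo/hi halving), then clamp.
def bisectRightLoop (xs : List Int) (x : Int) : Nat → Nat → Nat → Nat
  | 0, lo, _ => lo
  | fuel + 1, lo, hi =>
    if lo < hi then
      let mid := (lo + hi) / 2
      if x < xs.getD mid 0 then bisectRightLoop xs x fuel lo mid
      else bisectRightLoop xs x fuel (mid + 1) hi
    else lo

def bisectRight (xs : List Int) (x : Int) : Nat :=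
  bisectRightLoop xs x (xs.length + 1) 0 xs.length

def steps_to_level_alt (steps : Int) : Int :=
  max 1 (min ((bisectRight [0, 5, 15, 30, 50] steps : Nat) : Int) 5)

-- ===== PRECONDITION & SPEC =====
def Spec_steps_to_level (steps : Int) (out : Int) : Prop := out = steps_to_level_alt steps
instance (steps : Int) (out : Int) : Decidable (Spec_steps_to_level steps out) := by unfold Spec_steps_to_level; infer_instance

-- ===== CLAIM (what is proved, stated in full; the proofs are below) =====
def Claim_equal_steps_to_level : Prop := ∀ (steps : Int), Dom_steps_to_level steps → Spec_steps_to_level steps (steps_to_level steps)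

-- ===== LEMMAS AND PROOFS =====

-- ===== VERDICT (by name: the statement is the Claim_ definition above) =====
theorem steps_to_level_spec : Claim_equal_steps_to_level := by
  intro steps _
  unfold Spec_steps_to_level steps_to_level steps_to_level_alt bisectRight
  simp only [stepsLoop, bisectRightLoop, List.getD, List.length]
  norm_num
  split_ifs <;> omega
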